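-- pv_equiv track=rewrite | github.com/networkx/networkx | networkx/algorithms/coloring/equitable_coloring.py | make_N_from_L_C
-- ===== SOURCE A (Python) =====
-- def make_N_from_L_C(L, C):
--     nodes = L.keys()
--     colors = C.keys()
--     return {
--         (node, color): sum(1 for v in L[node] if v in C[color])
--         for node in nodes
--         for color in colors
--     }
-- ===== SOURCE B (Python) =====
-- def make_N_from_L_C(L, C):
--     # Invert C once: member node -> list of colors whose class contains it,
--     # then one pass over each node's adjacency list bumping per-color buckets.
--     colors_of = {}
--     for color, members in C.items():
--         for v in dict.fromkeys(members):
--             colors_of.setdefault(v, []).append(color)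
--     N = {}
--     for node, nbrs in L.items():
--         buckets = dict.fromkeys(C, 0)
--         for v in nbrs:
--             for c in colors_of.get(v, ()):
--                 buckets[c] += 1
--         for color, cnt in buckets.items():
--             N[(node, color)] = cnt
--     return N
-- ===== Notes on version B (the rewrite author's own statement) =====
-- stated objective: faster
-- what changed: Instead of scanning C[color] for membership for every (node, color) pair, B inverts C once into a member->colors map and makes a single pass over each node's adjacency list incrementing per-color buckets.
import Mathlib
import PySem

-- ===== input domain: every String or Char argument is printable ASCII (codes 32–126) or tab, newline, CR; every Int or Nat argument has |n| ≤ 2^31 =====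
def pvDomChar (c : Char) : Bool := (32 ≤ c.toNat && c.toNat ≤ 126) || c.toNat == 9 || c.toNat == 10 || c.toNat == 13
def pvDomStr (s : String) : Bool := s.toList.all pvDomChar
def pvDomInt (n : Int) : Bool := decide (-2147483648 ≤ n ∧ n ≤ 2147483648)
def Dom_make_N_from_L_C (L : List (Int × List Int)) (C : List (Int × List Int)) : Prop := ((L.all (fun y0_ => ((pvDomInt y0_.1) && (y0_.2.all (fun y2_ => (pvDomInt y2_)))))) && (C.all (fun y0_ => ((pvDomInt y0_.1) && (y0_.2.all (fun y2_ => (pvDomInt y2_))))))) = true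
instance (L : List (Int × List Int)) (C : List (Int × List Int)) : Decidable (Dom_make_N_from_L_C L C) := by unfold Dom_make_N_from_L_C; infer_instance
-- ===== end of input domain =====

-- B inverts C once into a node→colors map and fills per-color buckets in one pass over each
-- adjacency list, instead of A's membership scan of C[color] for every (node, color) pair.

-- ===== PORT A =====
-- dict comprehension over nodes × colors; sum(1 for v in L[node] if v in C[color])
def make_N_from_L_C (L : List (Int × List Int)) (C : List (Int × List Int)) : List (Int × Int × Int) :=
  ((PySem.Dict.mk L).keys).flatMap (fun node =>
    ((PySem.Dict.mk C).keys).map (fun color =>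
      (node, color,
        (((PySem.Dict.mk L).getD node []).map
          (fun v => if v ∈ (PySem.Dict.mk C).getD color [] then (1 : Int) else 0)).sum)))

-- ===== PORT B =====
-- colors_of: member → list of colors whose class contains it (dict.fromkeys dedups a class)
def pvColorsOf (C : List (Int × List Int)) : PySem.Dict Int (List Int) :=
  C.foldl (fun acc q =>
      (PySem.List.dedup q.2).foldl (fun a v => a.modify v [] (fun l => l ++ [q.1])) acc)
    PySem.Dict.empty

def make_N_from_L_C_alt (L : List (Int × List Int)) (C : List (Int × List Int)) : List (Int × Int × Int) :=
  let colorsOf := pvColorsOf C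
  L.flatMap (fun p =>
    let b0 := C.foldl (fun b q => b.insert q.1 (0 : Int)) PySem.Dict.empty
    let b1 := p.2.foldl (fun b v =>
        (colorsOf.getD v []).foldl (fun b c => b.modify c 0 (fun x => x + 1)) b) b0
    b1.items.map (fun q => (p.1, q.1, q.2)))

-- ===== PRECONDITION & SPEC =====
-- Pre_ requires the association lists to have distinct keys: a list with duplicate keys does
-- not represent any Python dict input (A's arguments are dicts), so nothing is claimed there.
def Pre_make_N_from_L_C (L : List (Int × List Int)) (C : List (Int × List Int)) : Prop :=
  (L.map (·.1)).Nodup ∧ (C.map (·.1)).Nodup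
instance (L : List (Int × List Int)) (C : List (Int × List Int)) : Decidable (Pre_make_N_from_L_C L C) := by unfold Pre_make_N_from_L_C; infer_instance

def pvWitness_make_N_from_L_C : (List (Int × List Int)) × (List (Int × List Int)) :=
  ([(0, [1, 2]), (1, [0])], [(5, [0, 1]), (6, [2])])

def Spec_make_N_from_L_C (L : List (Int × List Int)) (C : List (Int × List Int)) (out : List (Int × Int × Int)) : Prop := out = make_N_from_L_C_alt L C
instance (L : List (Int × List Int)) (C : List (Int × List Int)) (out : List (Int × Int × Int)) : Decidable (Spec_make_N_from_L_C L C out) := by unfold Spec_make_N_from_L_C; infer_instance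

-- ===== CLAIM (what is proved, stated in full; the proofs are below) =====
def Claim_equal_make_N_from_L_C : Prop := ∀ (L : List (Int × List Int)) (C : List (Int × List Int)), Dom_make_N_from_L_C L C → Pre_make_N_from_L_C L C → Spec_make_N_from_L_C L C (make_N_from_L_C L C)

-- ===== LEMMAS AND PROOFS =====

-- the inner dedup loop of pvColorsOf appends the color once iff v is a member of the class
theorem pvColorsOf_inner (ms : List Int) (c : Int) (d : PySem.Dict Int (List Int)) (v : Int) :
    ((PySem.List.dedup ms).foldl (fun a w => a.modify w [] (fun l => l ++ [c])) d).getD v []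
      = d.getD v [] ++ (if v ∈ ms then [c] else []) := by
  have e : ((PySem.List.dedup ms).foldl (fun a w => a.modify w [] (fun l => l ++ [c])) d)
      = (((PySem.List.dedup ms).map (fun w => (w, c))).foldl
          (fun a p => a.modify p.1 [] (fun l => l ++ [p.2])) d) := by
    rw [List.foldl_map]
  rw [e, PySem.Dict.getD_foldl_modify_append]
  congr 1
  rw [List.filter_map, List.map_map]
  simp only [Function.comp_def]
  rw [List.filter_beq]
  by_cases hv : v ∈ ms
  · rw [List.count_eq_one_of_mem (PySem.List.nodup_dedup ms)
        ((PySem.List.mem_dedup ms v).mpr hv)]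
    simp [hv]
  · rw [List.count_eq_zero_of_not_mem (fun h' => hv ((PySem.List.mem_dedup ms v).mp h'))]
    simp [hv]

-- lookup in the inverted map: the colors (in C order) whose class contains v
theorem pvColorsOf_getD (C : List (Int × List Int)) (v : Int) :
    (pvColorsOf C).getD v [] = (C.filter (fun q => decide (v ∈ q.2))).map (·.1) := by
  unfold pvColorsOf
  suffices h : ∀ (Cs : List (Int × List Int)) (d : PySem.Dict Int (List Int)),
      (Cs.foldl (fun acc q =>
          (PySem.List.dedup q.2).foldl (fun a w => a.modify w [] (fun l => l ++ [q.1])) acc) d).getD v []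
        = d.getD v [] ++ (Cs.filter (fun q => decide (v ∈ q.2))).map (·.1) by
    simpa using h C PySem.Dict.empty
  intro Cs
  induction Cs with
  | nil => intro d; simp
  | cons q rest ih =>
      intro d
      simp only [List.foldl_cons, ih, pvColorsOf_inner]
      by_cases hv : v ∈ q.2 <;> simp [hv]

-- every value of the bucket initialiser is 0
theorem pvB0_getD (C : List (Int × List Int)) (c : Int) :
    (C.foldl (fun b q => b.insert q.1 (0 : Int)) PySem.Dict.empty).getD c 0 = 0 := by
  suffices h : ∀ (Cs : List (Int × List Int)) (d : PySem.Dict Int Int),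
      (∀ x, d.getD x 0 = 0) →
      ∀ x, (Cs.foldl (fun b q => b.insert q.1 (0 : Int)) d).getD x 0 = 0 by
    exact h C PySem.Dict.empty (by simp) c
  intro Cs
  induction Cs with
  | nil => intro d hd x; simpa using hd x
  | cons q rest ih =>
      intro d hd x
      refine ih _ (fun y => ?_) x
      rw [PySem.Dict.getD_insert]
      split <;> simp [hd]

-- keys of the bucket initialiser are C's keys in order
theorem pvB0_keys (C : List (Int × List Int)) (hC : (C.map (·.1)).Nodup) :
    (C.foldl (fun b q => b.insert q.1 (0 : Int)) PySem.Dict.empty).keys = C.map (·.1) := by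
  rw [PySem.Dict.keys_foldl_insert_key C (·.1) (fun _ _ => (0 : Int)) PySem.Dict.empty]
  have : (PySem.Dict.empty : PySem.Dict Int Int).keys = ([] : List Int) := rfl
  rw [this, PySem.Set.update_nil_left, PySem.Set.ofList_eq_self_of_nodup _ hC]

-- an increment loop over keys that already exist leaves the key list unchanged
theorem pvInc_keys (l : List Int) (b : PySem.Dict Int Int) (h : ∀ x ∈ l, x ∈ b.keys) :
    (l.foldl (fun b c => b.modify c 0 (fun x => x + 1)) b).keys = b.keys := by
  rw [PySem.Dict.keys_foldl_modify l 0 (fun _ c _ => _ + 1) b,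
      PySem.Set.update_eq_append_filter]
  have : (PySem.Set.ofList l).filter (fun y => !(PySem.Set.contains b.keys y)) = [] := by
    rw [List.filter_eq_nil_iff]
    intro y hy
    have hyl : y ∈ l := (PySem.Set.mem_ofList l y).mp hy
    have hmem : y ∈ b.keys := h y hyl
    simp [PySem.Set.contains, hmem]
  rw [this, List.append_nil]

-- the bucket value at c after the pass over nbrs
theorem pvB1_getD (cf : Int → List Int) (nbrs : List Int) (b : PySem.Dict Int Int) (c : Int) :
    (nbrs.foldl (fun b v => (cf v).foldl (fun b c => b.modify c 0 (fun x => x + 1)) b) b).getD c 0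
      = b.getD c 0 + (nbrs.map (fun v => ((cf v).count c : Int))).sum := by
  induction nbrs generalizing b with
  | nil => simp
  | cons v rest ih =>
      simp only [List.foldl_cons, ih, List.map_cons, List.sum_cons,
        PySem.Dict.getD_foldl_modify_add_one]
      ring

-- count of color c among the colors of neighbour v, for (c, ms) an entry of C with unique keys
theorem pvCount_colors (C : List (Int × List Int)) (hC : (C.map (·.1)).Nodup)
    (q : Int × List Int) (hq : q ∈ C) (v : Int) :
    ((C.filter (fun q' => decide (v ∈ q'.2))).map (·.1)).count q.1
      = if v ∈ q.2 then 1 else 0 := by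
  induction C with
  | nil => cases hq
  | cons q0 rest ih =>
      simp only [List.map_cons, List.nodup_cons] at hC
      rcases List.mem_cons.mp hq with h | h
      · subst h
        have hnot : q.1 ∉ ((rest.filter (fun q' => decide (v ∈ q'.2))).map (·.1)) := by
          intro hmem
          rcases List.mem_map.mp hmem with ⟨q', hq', hk⟩
          exact hC.1 (hk ▸ List.mem_map_of_mem (List.mem_of_mem_filter hq'))
        by_cases hv : v ∈ q.2 <;>
          simp [hv, List.count_eq_zero_of_not_mem hnot]
      · have hne : q0.1 ≠ q.1 := by
          intro he
          exact hC.1 (he ▸ List.mem_map_of_mem h)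
        rw [← ih hC.2 h]
        by_cases hv0 : v ∈ q0.2 <;> simp [hv0, hne]

-- ===== VERDICT (by name: the statement is the Claim_ definition above) =====
theorem make_N_from_L_C_spec : Claim_equal_make_N_from_L_C := by
  intro L C _ hPre
  obtain ⟨hL, hC⟩ := hPre
  unfold Spec_make_N_from_L_C make_N_from_L_C make_N_from_L_C_alt
  have hkeysL : (PySem.Dict.mk L).keys = L.map (·.1) := rfl
  have hkeysC : (PySem.Dict.mk C).keys = C.map (·.1) := rfl
  rw [hkeysL, hkeysC, List.flatMap_map]
  apply List.flatMap_congr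
  intro p hp
  -- A's lookup of L[node] is p's own adjacency list
  have hLp : (PySem.Dict.mk L).getD p.1 [] = p.2 :=
    PySem.Dict.getD_of_mem_items (d := PySem.Dict.mk L) hp hL []
  simp only [hLp]
  -- B's row: bucket items in C-key order
  have hb0keys := pvB0_keys C hC
  have hb1keys : ((p.2.foldl (fun b v =>
      ((pvColorsOf C).getD v []).foldl (fun b c => b.modify c 0 (fun x => x + 1)) b)
        (C.foldl (fun b q => b.insert q.1 (0 : Int)) PySem.Dict.empty)).keys) = C.map (·.1) := by
    suffices h : ∀ (ns : List Int) (b : PySem.Dict Int Int), b.keys = C.map (·.1) →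
        (ns.foldl (fun b v =>
          ((pvColorsOf C).getD v []).foldl (fun b c => b.modify c 0 (fun x => x + 1)) b) b).keys
          = C.map (·.1) by
      exact h p.2 _ hb0keys
    intro ns
    induction ns with
    | nil => intro b hb; simpa using hb
    | cons v rest ih =>
        intro b hb
        refine ih _ ?_
        rw [pvInc_keys]
        · exact hb
        · intro x hx
          rw [pvColorsOf_getD] at hx
          rw [hb]
          rcases List.mem_map.mp hx with ⟨q', hq', rfl⟩
          exact List.mem_map_of_mem (List.mem_of_mem_filter hq')
  rw [PySem.Dict.items_eq_map_keys _ (hb1keys ▸ hC) 0, hb1keys]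
  simp only [List.map_map]
  apply List.map_congr_left
  intro q hq
  have hCq : (PySem.Dict.mk C).getD q.1 [] = q.2 :=
    PySem.Dict.getD_of_mem_items (d := PySem.Dict.mk C) hq hC []
  simp only [Function.comp, hCq, pvB1_getD, pvB0_getD, pvColorsOf_getD, zero_add]
  congr 1
  have : ∀ v ∈ p.2, (((C.filter (fun q' => decide (v ∈ q'.2))).map (·.1)).count q.1 : Int)
      = if v ∈ q.2 then (1 : Int) else 0 := by
    intro v _
    rw [pvCount_colors C hC q hq v]
    split <;> simp
  rw [List.map_congr_left this]
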